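-- pv_equiv track=rewrite | github.com/mrhedstrom/ha-tibber-pulse-mqtt | custom_components/tibber_pulse_mqtt/mqtt_client.py | _derive_subscribe_topic
-- ===== SOURCE A (Python) =====
-- def _derive_subscribe_topic(pattern: str) -> str:
--     """
--     Transform an extended '+' pattern into a valid MQTT subscribe topic.
--
--     Rule:
--     - If a level contains '+' and that level != '+', replace that entire level with '+'.
--       e.g., 'tibber-pulse-+/update' -> '+/update'
--     - Otherwise, keep each level as-is.
--     """
--     levels = pattern.split('/')
--     sub_levels = []
--     for lvl in levels:
--         if '+' in lvl and lvl != '+':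
--             sub_levels.append('+')
--         else:
--             sub_levels.append(lvl)
--     return '/'.join(sub_levels)
-- ===== SOURCE B (Python) =====
-- def _derive_subscribe_topic(pattern: str) -> str:
--     # Single left-to-right character scan: no split list is built; each level is
--     # flushed as '+' if a '+' was seen in it, else verbatim.
--     out = []
--     cur = []
--     has_plus = False
--     for ch in pattern:
--         if ch == '/':
--             out.append('+' if has_plus else ''.join(cur))
--             out.append('/')
--             cur = []
--             has_plus = False
--         else:
--             cur.append(ch)
--             if ch == '+':
--                 has_plus = True
--     out.append('+' if has_plus else ''.join(cur))
--     return ''.join(out)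
-- ===== Notes on version B (the rewrite author's own statement) =====
-- stated objective: alternative
-- what changed: Replaced the split-into-levels list, per-level rewrite loop and join by a single character scan that flushes each level on the fly, tracking only a has_plus flag; no list of levels is ever materialised.
import Mathlib
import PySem

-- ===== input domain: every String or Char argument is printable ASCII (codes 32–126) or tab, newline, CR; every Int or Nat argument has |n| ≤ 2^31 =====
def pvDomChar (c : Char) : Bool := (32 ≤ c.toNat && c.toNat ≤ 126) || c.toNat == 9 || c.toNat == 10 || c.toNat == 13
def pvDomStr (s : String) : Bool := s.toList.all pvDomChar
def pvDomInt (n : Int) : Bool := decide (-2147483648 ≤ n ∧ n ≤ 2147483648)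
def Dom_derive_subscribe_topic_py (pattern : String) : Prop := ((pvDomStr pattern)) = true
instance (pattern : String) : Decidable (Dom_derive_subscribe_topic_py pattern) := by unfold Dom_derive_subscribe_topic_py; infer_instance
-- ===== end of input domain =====

-- B replaces A's split('/') + per-level rewrite loop + '/'.join by a single character
-- scan that flushes each level on the fly (objective: alternative, same O(n) cost).

-- ===== PORT A =====
-- levels = pattern.split('/'); loop appending '+' or lvl; '/'.join(sub_levels)
def derive_subscribe_topic_py (pattern : String) : String :=
  let levels := PySem.Chars.splitOn pattern.toList ['/']
  let sub_levels := levels.foldl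
    (fun acc lvl =>
      if PySem.Chars.isIn ['+'] lvl && lvl != ['+'] then acc ++ [['+']]
      else acc ++ [lvl]) []
  String.ofList (PySem.Chars.join ['/'] sub_levels)

-- ===== PORT B =====
-- flush of the current (reversed) level: '+' if a '+' was seen, else the level
def bFlush (cur : List Char) (hasPlus : Bool) : List Char :=
  if hasPlus then ['+'] else cur.reverse

-- the scan loop of Source B: out-accumulator, has_plus flag, current level (reversed)
def bLoop : List Char → List Char → Bool → List Char → List Char
  | [], out, hasPlus, cur => out ++ bFlush cur hasPlus
  | c :: cs, out, hasPlus, cur =>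
    if c = '/' then bLoop cs (out ++ bFlush cur hasPlus ++ ['/']) false []
    else bLoop cs out (hasPlus || c == '+') (c :: cur)

def derive_subscribe_topic_py_alt (pattern : String) : String :=
  String.ofList (bLoop pattern.toList [] false [])

-- ===== PRECONDITION & SPEC =====
def Spec_derive_subscribe_topic_py (pattern : String) (out : String) : Prop := out = derive_subscribe_topic_py_alt pattern
instance (pattern : String) (out : String) : Decidable (Spec_derive_subscribe_topic_py pattern out) := by unfold Spec_derive_subscribe_topic_py; infer_instance

-- ===== CLAIM (what is proved, stated in full; the proofs are below) =====
def Claim_equal_derive_subscribe_topic_py : Prop := ∀ (pattern : String), Dom_derive_subscribe_topic_py pattern → Spec_derive_subscribe_topic_py pattern (derive_subscribe_topic_py pattern)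

-- ===== LEMMAS AND PROOFS =====

-- simple structural splitter on '/', the common reference form of both ports
def mySplit : List Char → List (List Char)
  | [] => [[]]
  | c :: cs =>
    if c = '/' then [] :: mySplit cs
    else
      match mySplit cs with
      | g :: gs => (c :: g) :: gs
      | [] => [[c]]

-- per-level rewrite, the common reference form of A's branch
def gLvl (lvl : List Char) : List Char := if '+' ∈ lvl then ['+'] else lvl

theorem mySplit_ne_nil (cs : List Char) : mySplit cs ≠ [] := by
  induction cs with
  | nil => simp [mySplit]
  | cons c cs ih =>
    simp only [mySplit]
    split
    · simp
    · cases h : mySplit cs with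
      | nil => exact absurd h ih
      | cons g gs => simp

theorem splitOn_go_eq (cs : List Char) :
    ∀ fuel, cs.length ≤ fuel → ∀ cur acc,
      PySem.Chars.splitOn.go ['/'] fuel cs cur acc =
        acc.reverse ++ (match mySplit cs with
          | g :: gs => (cur.reverse ++ g) :: gs
          | [] => [cur.reverse]) := by
  induction cs with
  | nil =>
    intro fuel _ cur acc
    cases fuel <;> simp [PySem.Chars.splitOn.go, mySplit]
  | cons c cs ih =>
    intro fuel hf cur acc
    cases fuel with
    | zero => simp at hf
    | succ f =>
      simp only [List.length_cons, Nat.succ_le_succ_iff] at hf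
      by_cases hc : c = '/'
      · subst hc
        simp only [PySem.Chars.splitOn.go, List.isPrefixOf, BEq.rfl, Bool.true_and,
          List.isPrefixOf_nil_left, if_true, List.length_singleton]
        rw [show List.drop 1 ('/' :: cs) = cs from rfl, ih f hf [] (cur.reverse :: acc)]
        have hne := mySplit_ne_nil cs
        cases h : mySplit cs with
        | nil => exact absurd h hne
        | cons g gs => simp [mySplit, h]
      · have hpre : (['/'].isPrefixOf (c :: cs)) = false := by
          simp only [List.isPrefixOf, Bool.and_true]
          exact beq_eq_false_iff_ne.mpr (fun h => hc h.symm)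
        simp only [PySem.Chars.splitOn.go, hpre, if_neg, Bool.false_eq_true,
          not_false_iff]
        rw [ih f hf (c :: cur) acc]
        have hne := mySplit_ne_nil cs
        cases h : mySplit cs with
        | nil => exact absurd h hne
        | cons g gs => simp [mySplit, hc, h]

theorem splitOn_eq_mySplit (cs : List Char) :
    PySem.Chars.splitOn cs ['/'] = mySplit cs := by
  show PySem.Chars.splitOn.go ['/'] (cs.length + 1) cs [] [] = mySplit cs
  rw [splitOn_go_eq cs (cs.length + 1) (Nat.le_succ _) [] []]
  have hne := mySplit_ne_nil cs
  cases h : mySplit cs with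
  | nil => exact absurd h hne
  | cons g gs => simp

-- A's branch computes exactly gLvl (the lvl = ['+'] guard is a no-op)
theorem branch_eq_gLvl (lvl : List Char) :
    (if PySem.Chars.isIn ['+'] lvl && lvl != ['+'] then ['+'] else lvl) = gLvl lvl := by
  have hin : PySem.Chars.isIn ['+'] lvl = true ↔ '+' ∈ lvl := by
    rw [show PySem.Chars.isIn ['+'] lvl = (PySem.Chars.find lvl ['+'] != -1) from rfl,
      bne_iff_ne]
    rw [Ne, ← not_iff_not, not_not, PySem.Chars.find_eq_neg_one_iff,
      List.singleton_infix_iff]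
  unfold gLvl
  by_cases hm : '+' ∈ lvl
  · by_cases he : lvl = ['+']
    · simp [he]
    · simp [hin.mpr hm, bne_iff_ne, Ne, he, hm]
  · have : PySem.Chars.isIn ['+'] lvl = false := by
      cases h : PySem.Chars.isIn ['+'] lvl
      · rfl
      · exact absurd (hin.mp h) hm
    simp [this, hm]

-- A's append-loop is a map of gLvl
theorem foldA_eq_map (levels : List (List Char)) (acc : List (List Char)) :
    levels.foldl
      (fun acc lvl =>
        if PySem.Chars.isIn ['+'] lvl && lvl != ['+'] then acc ++ [['+']]
        else acc ++ [lvl]) acc = acc ++ levels.map gLvl := by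
  induction levels generalizing acc with
  | nil => simp
  | cons lvl ls ih =>
    simp only [List.foldl_cons, List.map_cons]
    have : (if PySem.Chars.isIn ['+'] lvl && lvl != ['+'] then acc ++ [['+']]
        else acc ++ [lvl]) = acc ++ [gLvl lvl] := by
      rw [← branch_eq_gLvl lvl]; split <;> rfl
    rw [this, ih]
    simp

-- the scan invariant: bLoop realises join ∘ map gLvl over mySplit, with the
-- pending level cur prefixed onto the first group
theorem bLoop_eq (cs : List Char) :
    ∀ out cur, bLoop cs out (decide ('+' ∈ cur)) cur =
      out ++ PySem.Chars.join ['/']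
        ((match mySplit cs with
          | g :: gs => (cur.reverse ++ g) :: gs
          | [] => [cur.reverse]).map gLvl) := by
  induction cs with
  | nil =>
    intro out cur
    simp only [bLoop, mySplit, List.append_nil, List.map_cons, List.map_nil]
    have : PySem.Chars.join ['/'] [gLvl cur.reverse] = gLvl cur.reverse := by
      simp [PySem.Chars.join, List.intercalate]
    rw [this]
    unfold bFlush gLvl
    simp [List.mem_reverse]
  | cons c cs ih =>
    intro out cur
    by_cases hc : c = '/'
    · subst hc
      simp only [bLoop, if_true]
      have h0 : (false : Bool) = decide ('+' ∈ ([] : List Char)) := by simp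
      rw [h0, ih (out ++ bFlush cur (decide ('+' ∈ cur)) ++ ['/']) []]
      have hne := mySplit_ne_nil cs
      cases h : mySplit cs with
      | nil => exact absurd h hne
      | cons g gs =>
        simp only [mySplit, if_true, h, List.reverse_nil,
          List.nil_append, List.map_cons]
        rw [PySem.Chars.join_cons_cons]
        have hflush : bFlush cur (decide ('+' ∈ cur)) = gLvl cur.reverse := by
          unfold bFlush gLvl; simp [List.mem_reverse]
        rw [hflush]
        simp [List.append_assoc]
    · simp only [bLoop, if_neg hc]
      have hb : (decide ('+' ∈ cur) || (c == '+')) = decide ('+' ∈ c :: cur) := by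
        have hce : (c == '+') = decide (c = '+') := by
          by_cases h : c = '+' <;> simp [h]
        simp [List.mem_cons, Bool.or_comm, eq_comm, hce]
      rw [hb, ih out (c :: cur)]
      have hne := mySplit_ne_nil cs
      cases h : mySplit cs with
      | nil => exact absurd h hne
      | cons g gs =>
        simp [mySplit, hc, h, List.append_assoc]

-- ===== VERDICT (by name: the statement is the Claim_ definition above) =====
theorem derive_subscribe_topic_py_spec : Claim_equal_derive_subscribe_topic_py := by
  intro pattern _
  show derive_subscribe_topic_py pattern = derive_subscribe_topic_py_alt pattern
  simp only [derive_subscribe_topic_py, derive_subscribe_topic_py_alt]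
  have h0 : (false : Bool) = decide ('+' ∈ ([] : List Char)) := by simp
  rw [h0, bLoop_eq pattern.toList [] []]
  rw [splitOn_eq_mySplit, foldA_eq_map]
  have hne := mySplit_ne_nil pattern.toList
  cases h : mySplit pattern.toList with
  | nil => exact absurd h hne
  | cons g gs => simp
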